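-- pv_equiv track=rewrite | github.com/haebo9/coding-test | 백준/Bronze/8958. OX퀴즈/OX퀴즈.py | ox_check
-- ===== SOURCE A (Python) =====
-- def ox_check(ox):
--     total = 0
--     score = 1
--     for i in ox:
--         if i == 'O':
--             total += score
--             score += 1
--         else:
--             score = 1
--     return total
-- ===== SOURCE B (Python) =====
-- def ox_check(ox):
--     total = 0
--     i = 0
--     n = len(ox)
--     while i < n:
--         j = i
--         while j < n and ox[j] == 'O':
--             j += 1
--         L = j - i
--         total += L * (L + 1) // 2
--         i = j + 1
--     return total
-- ===== Notes on version B (the rewrite author's own statement) =====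
-- stated objective: alternative
-- what changed: B scans the string run by run with two indices (inner loop finds the end of each maximal 'O' run) and adds the closed-form triangular number L*(L+1)//2 per run, instead of A's single per-character loop with an incrementing score counter added on every 'O'.
import Mathlib
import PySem

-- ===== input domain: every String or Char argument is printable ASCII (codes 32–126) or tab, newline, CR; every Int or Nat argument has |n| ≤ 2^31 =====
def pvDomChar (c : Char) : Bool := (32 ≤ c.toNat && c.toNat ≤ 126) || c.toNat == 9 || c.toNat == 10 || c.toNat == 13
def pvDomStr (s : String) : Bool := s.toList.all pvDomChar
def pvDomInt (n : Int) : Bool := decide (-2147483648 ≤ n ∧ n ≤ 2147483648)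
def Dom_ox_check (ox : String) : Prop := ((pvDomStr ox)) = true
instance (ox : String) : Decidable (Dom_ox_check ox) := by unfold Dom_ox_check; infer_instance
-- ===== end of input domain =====

-- B scans the string run by run and adds the triangular number L*(L+1)//2 per maximal 'O' run, instead of A's per-character score counter (alternative, same cost).
-- ===== PORT A =====
def ox_check (ox : String) : Int :=
  (ox.toList.foldl (fun (st : Int × Int) i =>
    if i = 'O' then (st.1 + st.2, st.2 + 1) else (st.1, 1)) (0, 1)).1

-- ===== PORT B =====
-- Source B's outer while loop over runs = recursion on the remaining suffix; the inner
-- while loop counting consecutive 'O's from position i = takeWhile on the suffix.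
def ox_check_alt_go : List Char → Int
  | [] => 0
  | c :: tl =>
    let L : Int := ((c :: tl).takeWhile (· == 'O')).length
    L * (L + 1) / 2 + ox_check_alt_go ((c :: tl).drop (((c :: tl).takeWhile (· == 'O')).length + 1))
termination_by l => l.length
decreasing_by
  simp only [List.length_drop, List.length_cons]
  omega

def ox_check_alt (ox : String) : Int := ox_check_alt_go ox.toList

-- ===== PRECONDITION & SPEC =====
def Spec_ox_check (ox : String) (out : Int) : Prop := out = ox_check_alt ox
instance (ox : String) (out : Int) : Decidable (Spec_ox_check ox out) := by unfold Spec_ox_check; infer_instance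

-- ===== CLAIM =====
def Claim_equal_ox_check : Prop := ∀ (ox : String), Dom_ox_check ox → Spec_ox_check ox (ox_check ox)

-- ===== LEMMAS AND PROOFS =====
-- pvF l r: score still to be accumulated from suffix l when the current pending 'O' run has length r
def pvF : List Char → Int → Int
  | [], r => r * (r + 1) / 2
  | c :: tl, r => if c = 'O' then pvF tl (r + 1) else r * (r + 1) / 2 + pvF tl 0

theorem tri_step (r : Int) : (r + 1) * (r + 1 + 1) / 2 = r * (r + 1) / 2 + (r + 1) := by
  have h2 : (2:Int) ∣ r * (r + 1) := (Int.even_mul_succ_self r).two_dvd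
  have h2' : (2:Int) ∣ (r + 1) * (r + 1 + 1) := (Int.even_mul_succ_self (r+1)).two_dvd
  have e : (r + 1) * (r + 1 + 1) = r * (r + 1) + 2 * (r + 1) := by ring
  omega

-- A's fold from state (t, r+1) computes t + pvF l r − r(r+1)/2
theorem foldA_pvF (l : List Char) (t r : Int) :
    (l.foldl (fun (st : Int × Int) i =>
      if i = 'O' then (st.1 + st.2, st.2 + 1) else (st.1, 1)) (t, r + 1)).1
      + r * (r + 1) / 2 = t + pvF l r := by
  induction l generalizing t r with
  | nil => simp [pvF]
  | cons c tl ih =>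
    simp only [List.foldl_cons, pvF]
    by_cases hc : c = 'O'
    · simp only [if_pos hc]
      have h := ih (t + (r + 1)) (r + 1)
      have := tri_step r
      omega
    · simp only [if_neg hc]
      have h := ih t 0
      norm_num at h
      omega

theorem drop_takeWhile (l : List Char) :
    l.drop (l.takeWhile (· == 'O')).length = l.dropWhile (· == 'O') := by
  induction l with
  | nil => rfl
  | cons c tl ih =>
    by_cases hc : (c == 'O') = true
    · simp [hc, ih]
    · simp [hc]

theorem dropWhile_head_false (l : List Char) (c : Char) (tl : List Char)
    (h : l.dropWhile (· == 'O') = c :: tl) : (c == 'O') = false := by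
  induction l with
  | nil => simp at h
  | cons a tla ih =>
    by_cases ha : (a == 'O') = true
    · exact ih (by simpa [List.dropWhile_cons, ha] using h)
    · rw [List.dropWhile_cons, if_neg ha] at h
      cases h; simpa using ha

theorem pvF_run (l : List Char) (r : Int) :
    pvF l r = pvF (l.dropWhile (· == 'O')) (r + (l.takeWhile (· == 'O')).length) := by
  induction l generalizing r with
  | nil => simp
  | cons c tl ih =>
    by_cases hc : (c == 'O') = true
    · have hc' : c = 'O' := by simpa using hc
      rw [List.takeWhile_cons, List.dropWhile_cons, if_pos hc, if_pos hc]
      simp only [pvF, if_pos hc', List.length_cons]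
      rw [ih (r + 1)]
      congr 1
      push_cast
      ring
    · have hc' : ¬ c = 'O' := by simpa using hc
      rw [List.takeWhile_cons, List.dropWhile_cons, if_neg hc, if_neg hc]
      simp

theorem go_cons (a : Char) (tla : List Char) :
    ox_check_alt_go (a :: tla) =
      (((a :: tla).takeWhile (· == 'O')).length : Int)
        * ((((a :: tla).takeWhile (· == 'O')).length : Int) + 1) / 2
      + ox_check_alt_go ((a :: tla).drop (((a :: tla).takeWhile (· == 'O')).length + 1)) := by
  simp [ox_check_alt_go]

theorem drop_takeWhile_succ (l : List Char) :
    l.drop ((l.takeWhile (· == 'O')).length + 1) = (l.dropWhile (· == 'O')).drop 1 := by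
  rw [← drop_takeWhile l, List.drop_drop, Nat.add_comm]

theorem pvF_eq_go (l : List Char) : pvF l 0 = ox_check_alt_go l := by
  induction hn : l.length using Nat.strong_induction_on generalizing l with
  | _ n ih =>
  cases l with
  | nil => simp [pvF, ox_check_alt_go]
  | cons a tla =>
    have key := pvF_run (a :: tla) 0
    rw [zero_add] at key
    rw [go_cons, drop_takeWhile_succ, key]
    cases hdw : (a :: tla).dropWhile (· == 'O') with
    | nil =>
      simp [pvF, ox_check_alt_go]
    | cons c tl =>
      have hcO : ¬ c = 'O' := by
        have := dropWhile_head_false (a :: tla) c tl hdw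
        simpa using this
      have hlen : tl.length < n := by
        have hle : (c :: tl).length ≤ (a :: tla).length :=
          hdw ▸ List.length_dropWhile_le (p := (· == 'O')) (l := a :: tla)
        simp only [List.length_cons] at hle hn
        omega
      have hih := ih tl.length hlen tl rfl
      simp only [pvF, if_neg hcO, List.drop_succ_cons, List.drop_zero, hih]

-- ===== VERDICT =====
theorem ox_check_spec : Claim_equal_ox_check := by
  intro ox _
  show ox_check ox = ox_check_alt ox
  unfold ox_check ox_check_alt
  have h := foldA_pvF ox.toList 0 0
  have := pvF_eq_go ox.toList
  simp at h
  omega
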